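-- pv_equiv track=rewrite | github.com/pieoreo/py4e | Between_Calm_And_Passion.py | hot_cold
-- ===== SOURCE A (Python) =====
-- def hot_cold(emotion):
--
-- # count how many love between calm and passion
--     cnt = 0
--     for i in range(len(emotion)):
--         if emotion[i] == 'calm':
--             for i in range(i, len(emotion)):
--                 if emotion[i] == 'love':
--                     cnt = cnt+1
--                 elif emotion[i] == 'passion':
--                     break
--             return cnt
--         elif emotion[i] == 'passion':
--             for i in range(i, len(emotion)):
--                 if emotion[i] == 'love':
--                     cnt = cnt+1
--                 elif emotion[i] == 'calm':
--                     break
--             return cnt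
-- ===== SOURCE B (Python) =====
-- def _find_marker(emotion):
--     i = 0
--     for e in emotion:
--         if e == 'calm' or e == 'passion':
--             return (i, e)
--         i += 1
--     return None
--
-- def _find_opposite(region, opp):
--     j = 0
--     for e in region:
--         if e == opp:
--             return j
--         j += 1
--     return None
--
-- def _count_love(region):
--     cnt = 0
--     for e in region:
--         if e == 'love':
--             cnt += 1
--     return cnt
--
-- def hot_cold(emotion):
--     hit = _find_marker(emotion)
--     if hit is None:
--         return None
--     start, marker = hit
--     opp = 'passion' if marker == 'calm' else 'calm'
--     region = emotion[start:]
--     end = _find_opposite(region, opp)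
--     if end is None:
--         end = len(region)
--     return _count_love(region[:end])
-- ===== Notes on version B (the rewrite author's own statement) =====
-- stated objective: simpler
-- what changed: A's fused outer index scan with a nested counting loop and duplicated calm/passion branches is replaced by three separate single-purpose passes: find the first marker, find the first opposite marker in the suffix, then tally 'love' in the resolved slice.
import Mathlib
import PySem

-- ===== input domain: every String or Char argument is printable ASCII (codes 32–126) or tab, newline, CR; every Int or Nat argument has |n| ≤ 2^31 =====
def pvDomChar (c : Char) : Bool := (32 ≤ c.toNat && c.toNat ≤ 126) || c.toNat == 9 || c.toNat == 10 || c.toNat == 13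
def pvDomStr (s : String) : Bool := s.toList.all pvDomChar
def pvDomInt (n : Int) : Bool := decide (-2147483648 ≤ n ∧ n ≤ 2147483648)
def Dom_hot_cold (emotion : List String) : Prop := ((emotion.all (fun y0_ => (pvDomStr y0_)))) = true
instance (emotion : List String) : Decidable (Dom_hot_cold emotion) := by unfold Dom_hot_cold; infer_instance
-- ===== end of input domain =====

-- B replaces A's fused outer-scan-with-nested-counting-loop by three separate passes
-- (find first marker, find the opposite marker's index, tally 'love' in the slice);
-- objective: simpler decomposition, same cost.

-- ===== PORT A =====
-- A's inner 'for i in range(i, len(emotion))' loop: counts 'love', stops at opp.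
def innerA (opp : String) : List String → Int → Int
  | [], cnt => cnt
  | x :: rest, cnt =>
    if x = "love" then innerA opp rest (cnt + 1)
    else if x = opp then cnt
    else innerA opp rest cnt

def hot_cold (emotion : List String) : Option Int :=
  match emotion with
  | [] => none
  | x :: rest =>
    if x = "calm" then some (innerA "passion" (x :: rest) 0)
    else if x = "passion" then some (innerA "calm" (x :: rest) 0)
    else hot_cold rest

-- ===== PORT B =====
-- Source B _find_marker: first index (and value) of 'calm'/'passion'
def bFindMarker : List String → Int → Option (Int × String)
  | [], _ => none
  | e :: rest, i =>
    if e = "calm" ∨ e = "passion" then some (i, e) else bFindMarker rest (i + 1)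

-- Source B _find_opposite: first index of opp in region
def bFindOpp (opp : String) : List String → Int → Option Int
  | [], _ => none
  | e :: rest, j => if e = opp then some j else bFindOpp opp rest (j + 1)

-- Source B _count_love
def bCountLove : List String → Int → Int
  | [], cnt => cnt
  | e :: rest, cnt =>
    if e = "love" then bCountLove rest (cnt + 1) else bCountLove rest cnt

def hot_cold_alt (emotion : List String) : Option Int :=
  match bFindMarker emotion 0 with
  | none => none
  | some (start, marker) =>
    let opp := if marker = "calm" then "passion" else "calm"
    let region := PySem.List.slice emotion (some start) none
    let endIdx : Int :=
      match bFindOpp opp region 0 with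
      | none => (region.length : Int)
      | some j => j
    some (bCountLove (PySem.List.slice region none (some endIdx)) 0)

-- ===== PRECONDITION & SPEC =====
def Spec_hot_cold (emotion : List String) (out : Option Int) : Prop := out = hot_cold_alt emotion
instance (emotion : List String) (out : Option Int) : Decidable (Spec_hot_cold emotion out) := by unfold Spec_hot_cold; infer_instance

-- ===== CLAIM (what is proved, stated in full; the proofs are below) =====
def Claim_equal_hot_cold : Prop := ∀ (emotion : List String), Dom_hot_cold emotion → Spec_hot_cold emotion (hot_cold emotion)

-- ===== LEMMAS AND PROOFS =====

theorem bFindMarker_shift (xs : List String) (i : Int) :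
    bFindMarker xs (i + 1) = (bFindMarker xs i).map (fun p => (p.1 + 1, p.2)) := by
  induction xs generalizing i with
  | nil => rfl
  | cons e rest ih =>
    simp only [bFindMarker]
    split_ifs <;> simp [ih]

theorem bFindMarker_nonneg (xs : List String) (i k : Int) (m : String)
    (h : bFindMarker xs i = some (k, m)) : i ≤ k := by
  induction xs generalizing i with
  | nil => simp [bFindMarker] at h
  | cons e rest ih =>
    simp only [bFindMarker] at h
    split_ifs at h with he
    · simp at h; omega
    · have := ih (i + 1) h; omega

theorem bFindOpp_shift (opp : String) (xs : List String) (j : Int) :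
    bFindOpp opp xs (j + 1) = (bFindOpp opp xs j).map (· + 1) := by
  induction xs generalizing j with
  | nil => rfl
  | cons e rest ih =>
    simp only [bFindOpp]
    split_ifs <;> simp [ih]

theorem bFindOpp_nonneg (opp : String) (xs : List String) (j k : Int)
    (h : bFindOpp opp xs j = some k) : j ≤ k := by
  induction xs generalizing j with
  | nil => simp [bFindOpp] at h
  | cons e rest ih =>
    simp only [bFindOpp] at h
    split_ifs at h with he
    · simp at h; omega
    · have := ih (j + 1) h; omega

-- region[:end] (end = first index of opp, or len) is exactly the opp-free prefix
theorem take_end_eq_takeWhile (opp : String) (xs : List String) :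
    xs.take (match bFindOpp opp xs 0 with
             | none => (xs.length : Int)
             | some j => j).toNat
      = xs.takeWhile (fun a => !(a == opp)) := by
  induction xs with
  | nil => rfl
  | cons x rest ih =>
    by_cases hx : x = opp
    · simp [bFindOpp, hx, List.takeWhile]
    · have hs : bFindOpp opp (x :: rest) 0 = (bFindOpp opp rest 0).map (· + 1) := by
        have h1 : bFindOpp opp (x :: rest) 0 = bFindOpp opp rest 1 := by
          simp [bFindOpp, hx]
        have h2 := bFindOpp_shift opp rest 0
        norm_num at h2
        rw [h1, h2]
      rw [List.takeWhile_cons]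
      cases hr : bFindOpp opp rest 0 with
      | none =>
        rw [hs, hr]
        simp only [Option.map_none]
        simp only [hr] at ih
        simp [hx, List.take_succ_cons, ← ih]
      | some j =>
        have hj : 0 ≤ j := bFindOpp_nonneg opp rest 0 j hr
        rw [hs, hr]
        simp only [Option.map_some]
        simp only [hr] at ih
        have : (j + 1).toNat = j.toNat + 1 := by omega
        simp [hx, this, List.take_succ_cons, ← ih]

-- A's inner loop equals B's tally over the opp-free prefix
theorem innerA_eq (opp : String) (hopp : opp ≠ "love") (xs : List String) (cnt : Int) :
    innerA opp xs cnt = bCountLove (xs.takeWhile (fun a => !(a == opp))) cnt := by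
  induction xs generalizing cnt with
  | nil => rfl
  | cons x rest ih =>
    have hlo : ("love" : String) ≠ opp := fun h => hopp h.symm
    by_cases hlove : x = "love"
    · subst hlove
      simp [innerA, hlo, bCountLove, ih]
    · by_cases hxo : x = opp
      · subst hxo
        simp [innerA, hlove, bCountLove]
      · simp [innerA, hlove, hxo, bCountLove, ih]

-- the crux at a marker head: A's fused loop = B's three passes on the same region
theorem marker_case (marker : String) (xs : List String) :
    innerA (if marker = "calm" then "passion" else "calm") xs 0 =
      bCountLove (PySem.List.slice xs none (some
        (match bFindOpp (if marker = "calm" then "passion" else "calm") xs 0 with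
         | none => (xs.length : Int)
         | some j => j))) 0 := by
  set opp : String := if marker = "calm" then "passion" else "calm" with hopp
  have hne : opp ≠ "love" := by
    rw [hopp]; split_ifs <;> decide
  have hb : (0:Int) ≤ (match bFindOpp opp xs 0 with
             | none => (xs.length : Int)
             | some j => j) := by
    cases hr : bFindOpp opp xs 0 with
    | none => simp
    | some j => simpa using bFindOpp_nonneg opp xs 0 j hr
  rw [PySem.List.slice_to xs hb, take_end_eq_takeWhile, innerA_eq opp hne]

theorem hot_cold_eq_alt (emotion : List String) : hot_cold emotion = hot_cold_alt emotion := by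
  induction emotion with
  | nil => rfl
  | cons x rest ih =>
    by_cases hc : x = "calm" <;> by_cases hp : x = "passion"
    · simp [hc] at hp
    · -- head is 'calm'
      subst hc
      have hm : bFindMarker ("calm" :: rest) 0 = some (0, "calm") := by
        simp [bFindMarker]
      have hreg : PySem.List.slice ("calm" :: rest) (some (0:Int)) none = "calm" :: rest := by
        rw [PySem.List.slice_from ("calm" :: rest) (by omega : (0:Int) ≤ 0)]
        simp
      have hmc := marker_case "calm" ("calm" :: rest)
      norm_num at hmc
      simp [hot_cold, hot_cold_alt, hm, hreg, hmc]
    · -- head is 'passion'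
      subst hp
      have hm : bFindMarker ("passion" :: rest) 0 = some (0, "passion") := by
        simp [bFindMarker]
      have hreg : PySem.List.slice ("passion" :: rest) (some (0:Int)) none = "passion" :: rest := by
        rw [PySem.List.slice_from ("passion" :: rest) (by omega : (0:Int) ≤ 0)]
        simp
      have hmc := marker_case "passion" ("passion" :: rest)
      have hpc : ("passion" : String) ≠ "calm" := by decide
      simp [hpc] at hmc
      simp [hot_cold, hot_cold_alt, hm, hreg, hmc, hpc]
    · -- head is neither marker: both sides recurse
      have hstep : hot_cold (x :: rest) = hot_cold rest := by
        simp [hot_cold, hc, hp]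
      rw [hstep, ih, hot_cold_alt, hot_cold_alt]
      have hm : bFindMarker (x :: rest) 0 = (bFindMarker rest 0).map (fun p => (p.1 + 1, p.2)) := by
        have : bFindMarker (x :: rest) 0 = bFindMarker rest 1 := by
          simp [bFindMarker, hc, hp]
        rw [this]; simpa using bFindMarker_shift rest 0
      rw [hm]
      cases hr : bFindMarker rest 0 with
      | none => simp
      | some p =>
        obtain ⟨k, m⟩ := p
        have hk : 0 ≤ k := bFindMarker_nonneg rest 0 k m hr
        simp only [Option.map_some]
        have hsl : PySem.List.slice (x :: rest) (some (k + 1)) none =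
            PySem.List.slice rest (some k) none := by
          rw [PySem.List.slice_from (x :: rest) (by omega : (0:Int) ≤ k + 1),
            PySem.List.slice_from rest hk]
          have : (k + 1).toNat = k.toNat + 1 := by omega
          simp [this]
        rw [hsl]

-- ===== VERDICT (by name: the statement is the Claim_ definition above) =====
theorem hot_cold_spec : Claim_equal_hot_cold := by
  intro emotion _
  exact hot_cold_eq_alt emotion
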